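-- pv_equiv track=rewrite | github.com/dopheide-esnet/aoc2021 | 9/aoc9.py | Basins
-- ===== SOURCE A (Python) =====
-- def Explore(map,basins,idx,y,x):
--     '''
--     y, x is the new location we're exploring from.
--     '''
--     if(y > 0 and (y-1,x) not in basins[idx] and map[y-1][x] != 9):
--         # up
--         basins[idx].append((y-1,x))
--         Explore(map,basins,idx,y-1,x)
--     if(x > 0 and (y,x-1) not in basins[idx] and map[y][x-1] != 9):
--         # left
--         basins[idx].append((y,x-1))
--         Explore(map,basins,idx,y,x-1)
--     if(y < len(map) - 1 and (y+1,x) not in basins[idx] and map[y+1][x] != 9):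
--         # down
--         basins[idx].append((y+1,x))
--         Explore(map,basins,idx,y+1,x)
--     if(x < len(map[y]) - 1 and (y,x+1) not in basins[idx] and map[y][x+1] != 9):
--         basins[idx].append((y,x+1))
--         Explore(map,basins,idx,y,x+1)
--
-- def Basins(map):
--     '''
--     Find low spots (same as before) and expand them into basins.
--     '''
--     basins = {}
--     for y in range(len(map)):
--         for x in range(len(map[y])):
--             if(y==0 or (y > 0 and map[y][x] < map[y-1][x])):
--                 if(y == len(map)-1 or (y < len(map)-1 and map[y][x] < map[y+1][x])):
--                     if(x==0 or (x > 0 and map[y][x] < map[y][x-1])):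
--                         if(x == len(map[y])-1 or (x < len(map[y])-1 and map[y][x] < map[y][x+1])):
--
--                             # Explore this basin
--                             basins[(y,x)] = []
--                             basins[(y,x)].append((y,x))
--                             Explore(map,basins,(y,x),y,x)
--
--
--     return basins
-- ===== SOURCE B (Python) =====
-- def _flood(map, y, x):
--     # Iterative DFS with explicit frames [fy, fx, next-direction]; emits cells
--     # in exactly the discovery (preorder) order: up, left, down, right.
--     basin = [(y, x)]
--     stack = [[y, x, 0]]
--     while stack:
--         fy, fx, d = stack[-1]
--         if d == 4:
--             stack.pop()
--             continue
--         stack[-1][2] = d + 1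
--         ny, nx = ((fy - 1, fx), (fy, fx - 1), (fy + 1, fx), (fy, fx + 1))[d]
--         if 0 <= ny < len(map) and 0 <= nx < len(map[ny]) and (ny, nx) not in basin and map[ny][nx] != 9:
--             basin.append((ny, nx))
--             stack.append([ny, nx, 0])
--     return basin
--
-- def Basins(map):
--     basins = {}
--     rows = len(map)
--     for y in range(rows):
--         row = map[y]
--         for x in range(len(row)):
--             v = row[x]
--             nbrs = []
--             if y > 0:
--                 nbrs.append((y - 1, x))
--             if x > 0:
--                 nbrs.append((y, x - 1))
--             if y < rows - 1:
--                 nbrs.append((y + 1, x))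
--             if x < len(row) - 1:
--                 nbrs.append((y, x + 1))
--             if all(map[ny][nx] > v for (ny, nx) in nbrs):
--                 basins[(y, x)] = _flood(map, y, x)
--     return basins
-- ===== Notes on version B (the rewrite author's own statement) =====
-- stated objective: alternative
-- what changed: The recursive flood fill (Explore, mutating a shared dict entry through the call stack) is replaced by an iterative DFS over an explicit stack of resumable frames (cell plus next-direction index), which emits the same discovery order; the four copy-pasted low-point if-chains become an all() test over the in-bounds neighbour list. Pre_ excludes ragged maps (rows of unequal length), on which A's unguarded map[y+-1][x] neighbour indexing generally raises IndexError; on the rare ragged maps where A happens to return, B returns the same value.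
-- outside the precondition, e.g. on Basins([[9, 9], [9, 9], [3]]): A returns {(2, 0): [(2, 0)]}, B returns {(2, 0): [(2, 0)]}
import Mathlib
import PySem

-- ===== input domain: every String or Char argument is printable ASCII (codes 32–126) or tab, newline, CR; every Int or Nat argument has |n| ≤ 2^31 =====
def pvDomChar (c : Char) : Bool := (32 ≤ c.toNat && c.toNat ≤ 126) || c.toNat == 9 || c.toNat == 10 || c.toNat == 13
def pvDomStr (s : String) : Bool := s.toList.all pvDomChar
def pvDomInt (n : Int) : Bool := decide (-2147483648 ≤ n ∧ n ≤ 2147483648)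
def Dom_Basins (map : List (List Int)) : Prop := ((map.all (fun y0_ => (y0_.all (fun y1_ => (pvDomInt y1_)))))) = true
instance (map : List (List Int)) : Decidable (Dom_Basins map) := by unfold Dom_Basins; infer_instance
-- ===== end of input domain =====

-- B replaces A's recursive flood fill with an explicit-stack DFS of resumable frames (same discovery
-- order) and condenses the low-point test; equivalence is proved on rectangular maps (Pre_).

-- map[y][x] and len(map[y]) (indices guarded nonnegative and in range at every use site under Pre_)
def pvCell (map : List (List Int)) (y x : Int) : Int :=
  (PySem.List.pyGet? ((PySem.List.pyGet? map y).getD []) x).getD 0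

def pvRowLen (map : List (List Int)) (y : Int) : Int :=
  (((PySem.List.pyGet? map y).getD []).length : Int)

-- fuel bound used by both ports' loops: total number of grid cells + 1 (proved never exhausted under Pre_)
def pvFuel (map : List (List Int)) : Nat := (map.map List.length).sum + 1

-- ===== PORT A =====
-- Explore(map, basins, idx, y, x) reads and writes only basins[idx]; it is ported as a function of
-- that one list (the basin being grown), threaded in place of the Python in-place mutation.
def pvExplore (map : List (List Int)) : Nat → List (Int × Int) → Int → Int → List (Int × Int)
  | 0, basin, _, _ => basin
  | f + 1, basin, y, x =>
    let b1 := if y > 0 ∧ (y - 1, x) ∉ basin ∧ pvCell map (y - 1) x ≠ 9 then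
        pvExplore map f (basin ++ [(y - 1, x)]) (y - 1) x else basin
    let b2 := if x > 0 ∧ (y, x - 1) ∉ b1 ∧ pvCell map y (x - 1) ≠ 9 then
        pvExplore map f (b1 ++ [(y, x - 1)]) y (x - 1) else b1
    let b3 := if y < (map.length : Int) - 1 ∧ (y + 1, x) ∉ b2 ∧ pvCell map (y + 1) x ≠ 9 then
        pvExplore map f (b2 ++ [(y + 1, x)]) (y + 1) x else b2
    let b4 := if x < pvRowLen map y - 1 ∧ (y, x + 1) ∉ b3 ∧ pvCell map y (x + 1) ≠ 9 then
        pvExplore map f (b3 ++ [(y, x + 1)]) y (x + 1) else b3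
    b4

def Basins (map : List (List Int)) : List (Int × Int × List (Int × Int)) :=
  let d := (PySem.List.pyRange 0 (map.length : Int) 1).foldl
    (fun (d : PySem.Dict (Int × Int) (List (Int × Int))) y =>
      (PySem.List.pyRange 0 (pvRowLen map y) 1).foldl
        (fun d x =>
          if (y = 0 ∨ (y > 0 ∧ pvCell map y x < pvCell map (y - 1) x)) ∧
             (y = (map.length : Int) - 1 ∨ (y < (map.length : Int) - 1 ∧ pvCell map y x < pvCell map (y + 1) x)) ∧
             (x = 0 ∨ (x > 0 ∧ pvCell map y x < pvCell map y (x - 1))) ∧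
             (x = pvRowLen map y - 1 ∨ (x < pvRowLen map y - 1 ∧ pvCell map y x < pvCell map y (x + 1)))
          then d.insert (y, x) (pvExplore map (pvFuel map) [(y, x)] y x)
          else d) d)
    PySem.Dict.empty
  d.items.map (fun p => (p.1.1, p.1.2, p.2))

-- ===== PORT B =====
-- ((fy-1,fx),(fy,fx-1),(fy+1,fx),(fy,fx+1))[d]
def pvNbr (y x : Int) (d : Nat) : Int × Int :=
  match d with
  | 0 => (y - 1, x)
  | 1 => (y, x - 1)
  | 2 => (y + 1, x)
  | _ => (y, x + 1)

-- the while-stack loop of _flood; frames carry the next direction to try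
def pvFlood (map : List (List Int)) :
    Nat → List (Int × Int) → List ((Int × Int) × Nat) → List (Int × Int)
  | _, basin, [] => basin
  | fuel, basin, ((fy, fx), d) :: rest =>
    if 4 ≤ d then pvFlood map fuel basin rest
    else
      if 0 ≤ (pvNbr fy fx d).1 ∧ (pvNbr fy fx d).1 < (map.length : Int) ∧
         0 ≤ (pvNbr fy fx d).2 ∧ (pvNbr fy fx d).2 < pvRowLen map (pvNbr fy fx d).1 ∧
         pvNbr fy fx d ∉ basin ∧ pvCell map (pvNbr fy fx d).1 (pvNbr fy fx d).2 ≠ 9 then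
        match fuel with
        | 0 => basin
        | f + 1 =>
          pvFlood map f (basin ++ [pvNbr fy fx d]) ((pvNbr fy fx d, 0) :: ((fy, fx), d + 1) :: rest)
      else
        pvFlood map fuel basin (((fy, fx), d + 1) :: rest)
  termination_by fuel _ stack => (fuel, stack.length + (stack.map (fun fr => 5 - fr.2)).sum)
  decreasing_by
  · apply Prod.Lex.right; simp; omega
  · apply Prod.Lex.left; omega
  · apply Prod.Lex.right; simp; omega

def Basins_alt (map : List (List Int)) : List (Int × Int × List (Int × Int)) :=
  let d := (PySem.List.pyRange 0 (map.length : Int) 1).foldl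
    (fun (d : PySem.Dict (Int × Int) (List (Int × Int))) y =>
      (PySem.List.pyRange 0 (pvRowLen map y) 1).foldl
        (fun d x =>
          let v := pvCell map y x
          let nbrs :=
            (if y > 0 then [(y - 1, x)] else []) ++
            (if x > 0 then [(y, x - 1)] else []) ++
            (if y < (map.length : Int) - 1 then [(y + 1, x)] else []) ++
            (if x < pvRowLen map y - 1 then [(y, x + 1)] else [])
          if nbrs.all (fun c => pvCell map c.1 c.2 > v) then
            d.insert (y, x) (pvFlood map (pvFuel map) [(y, x)] [((y, x), 0)])
          else d) d)
    PySem.Dict.empty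
  d.items.map (fun p => (p.1.1, p.1.2, p.2))

-- ===== PRECONDITION & SPEC =====
-- Pre_ excludes ragged maps (rows of unequal length): there A's unguarded map[y±1][x] neighbour
-- indexing generally raises IndexError (on the rare ragged maps where A returns, B returns the same value).
def Pre_Basins (map : List (List Int)) : Prop := ∀ r ∈ map, r.length = (map.headD []).length
instance (map : List (List Int)) : Decidable (Pre_Basins map) := by unfold Pre_Basins; infer_instance

def pvWitness_Basins : List (List Int) := [[1, 9], [9, 8]]

def Spec_Basins (map : List (List Int)) (out : List (Int × Int × List (Int × Int))) : Prop := out = Basins_alt map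
instance (map : List (List Int)) (out : List (Int × Int × List (Int × Int))) : Decidable (Spec_Basins map out) := by unfold Spec_Basins; infer_instance

-- ===== CLAIM (what is proved, stated in full; the proofs are below) =====
def Claim_equal_Basins : Prop := ∀ (map : List (List Int)), Dom_Basins map → Pre_Basins map → Spec_Basins map (Basins map)

-- ===== LEMMAS AND PROOFS =====

-- (y, x) is a valid cell of the grid
def pvInG (map : List (List Int)) (c : Int × Int) : Prop :=
  0 ≤ c.1 ∧ c.1 < (map.length : Int) ∧ 0 ≤ c.2 ∧ c.2 < pvRowLen map c.1

-- invariant carried by every basin list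
def pvP (map : List (List Int)) (b : List (Int × Int)) : Prop :=
  b.Nodup ∧ ∀ c ∈ b, pvInG map c

-- A's four sequential if-blocks, indexed by the direction already reached
def pvAFrom (map : List (List Int)) (fA : Nat) : Nat → List (Int × Int) → Int → Int → List (Int × Int)
  | 0, b, y, x => pvAFrom map fA 1
      (if y > 0 ∧ (y - 1, x) ∉ b ∧ pvCell map (y - 1) x ≠ 9 then
        pvExplore map fA (b ++ [(y - 1, x)]) (y - 1) x else b) y x
  | 1, b, y, x => pvAFrom map fA 2
      (if x > 0 ∧ (y, x - 1) ∉ b ∧ pvCell map y (x - 1) ≠ 9 then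
        pvExplore map fA (b ++ [(y, x - 1)]) y (x - 1) else b) y x
  | 2, b, y, x => pvAFrom map fA 3
      (if y < (map.length : Int) - 1 ∧ (y + 1, x) ∉ b ∧ pvCell map (y + 1) x ≠ 9 then
        pvExplore map fA (b ++ [(y + 1, x)]) (y + 1) x else b) y x
  | 3, b, y, x => pvAFrom map fA 4
      (if x < pvRowLen map y - 1 ∧ (y, x + 1) ∉ b ∧ pvCell map y (x + 1) ≠ 9 then
        pvExplore map fA (b ++ [(y, x + 1)]) y (x + 1) else b) y x
  | _ + 4, b, _, _ => b
  termination_by d => 5 - d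

lemma explore_eq_aFrom (map : List (List Int)) (f : Nat) (b : List (Int × Int)) (y x : Int) :
    pvExplore map (f + 1) b y x = pvAFrom map f 0 b y x := by
  simp only [pvExplore, pvAFrom]

lemma pvRowLen_eq_head (map : List (List Int)) (hpre : Pre_Basins map) {y : Int}
    (h0 : 0 ≤ y) (h1 : y < (map.length : Int)) :
    pvRowLen map y = ((map.headD []).length : Int) := by
  have hy : y.toNat < map.length := by omega
  unfold pvRowLen
  rw [PySem.List.pyGet?_of_nonneg _ h0, List.getElem?_eq_getElem hy]
  simp [hpre _ (List.getElem_mem hy)]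

lemma pvInG_up (map : List (List Int)) (hpre : Pre_Basins map) {y x : Int}
    (hin : pvInG map (y, x)) (hy : 0 < y) : pvInG map (y - 1, x) := by
  obtain ⟨h1, h2, h3, h4⟩ := hin
  refine ⟨by omega, by omega, h3, ?_⟩
  rw [pvRowLen_eq_head map hpre (by omega) (by omega)]
  rwa [pvRowLen_eq_head map hpre h1 h2] at h4

lemma pvInG_left (map : List (List Int)) {y x : Int}
    (hin : pvInG map (y, x)) (hx : 0 < x) : pvInG map (y, x - 1) := by
  obtain ⟨h1, h2, h3, h4⟩ := hin
  refine ⟨h1, h2, by omega, ?_⟩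
  dsimp only at h4 ⊢; omega

lemma pvInG_down (map : List (List Int)) (hpre : Pre_Basins map) {y x : Int}
    (hin : pvInG map (y, x)) (hy : y < (map.length : Int) - 1) : pvInG map (y + 1, x) := by
  obtain ⟨h1, h2, h3, h4⟩ := hin
  refine ⟨by omega, by omega, h3, ?_⟩
  rw [pvRowLen_eq_head map hpre (by omega) (by omega)]
  rwa [pvRowLen_eq_head map hpre h1 h2] at h4

lemma pvInG_right (map : List (List Int)) {y x : Int}
    (hin : pvInG map (y, x)) (hx : x < pvRowLen map y - 1) : pvInG map (y, x + 1) := by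
  obtain ⟨h1, h2, h3, h4⟩ := hin
  exact ⟨h1, h2, by omega, by simp only; omega⟩

-- the full cell list of the grid, used only for the cardinality bound
def pvGrid : List (List Int) → Int → List (Int × Int)
  | [], _ => []
  | r :: rs, y => (List.range r.length).map (fun (xn : Nat) => (y, (xn : Int))) ++ pvGrid rs (y + 1)

lemma pvGrid_length (rs : List (List Int)) (y0 : Int) :
    (pvGrid rs y0).length = (rs.map List.length).sum := by
  induction rs generalizing y0 with
  | nil => simp [pvGrid]
  | cons r rs ih => simp [pvGrid, ih]

lemma mem_pvGrid (rs : List (List Int)) (y0 : Int) (c : Int × Int)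
    (h1 : y0 ≤ c.1) (h2 : c.1 < y0 + rs.length) (h3 : 0 ≤ c.2)
    (h4 : c.2 < ((rs.getD (c.1 - y0).toNat []).length : Int)) : c ∈ pvGrid rs y0 := by
  induction rs generalizing y0 with
  | nil => simp at h2; omega
  | cons r rs ih =>
    rw [pvGrid, List.mem_append]
    by_cases hy : c.1 = y0
    · left
      have hz : (c.1 - y0).toNat = 0 := by omega
      rw [hz] at h4
      have hr : (r :: rs).getD 0 [] = r := rfl
      rw [hr] at h4
      refine List.mem_map.mpr ⟨c.2.toNat, List.mem_range.mpr (by omega), ?_⟩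
      have hc2 : (c.2.toNat : Int) = c.2 := Int.toNat_of_nonneg h3
      rw [hc2, ← hy]
    · right
      apply ih (y0 + 1) (by omega) (by simp at h2 ⊢; omega)
      have hk : (c.1 - y0).toNat = (c.1 - (y0 + 1)).toNat + 1 := by omega
      rw [hk] at h4
      have hr : (r :: rs).getD ((c.1 - (y0 + 1)).toNat + 1) [] = rs.getD (c.1 - (y0 + 1)).toNat [] := rfl
      rwa [hr] at h4

lemma basin_len_le (map : List (List Int)) (b : List (Int × Int)) (hb : pvP map b) :
    b.length ≤ (map.map List.length).sum := by
  have hsub : b ⊆ pvGrid map 0 := by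
    intro c hc
    obtain ⟨h1, h2, h3, h4⟩ := hb.2 c hc
    apply mem_pvGrid map 0 c h1 (by omega) h3
    have : pvRowLen map c.1 = ((map.getD (c.1 - 0).toNat []).length : Int) := by
      unfold pvRowLen
      rw [PySem.List.pyGet?_of_nonneg _ h1]
      simp [List.getD_eq_getElem?_getD]
    rwa [this] at h4
  calc b.length ≤ (pvGrid map 0).length := (List.subperm_of_subset hb.1 hsub).length_le
    _ = _ := pvGrid_length map 0

lemma pvP_append_fresh (map : List (List Int)) {b : List (Int × Int)} {nb : Int × Int}
    (hb : pvP map b) (hnb : pvInG map nb) (hf : nb ∉ b) : pvP map (b ++ [nb]) := by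
  refine ⟨List.nodup_append.mpr ⟨hb.1, List.nodup_singleton _, ?_⟩, ?_⟩
  · intro a ha a' ha'
    simp only [List.mem_singleton] at ha'
    subst ha'
    exact fun he => hf (he ▸ ha)
  · intro c hc
    rcases List.mem_append.mp hc with h | h
    · exact hb.2 c h
    · simp only [List.mem_singleton] at h; subst h; exact hnb

def pvPostStmt (map : List (List Int)) (n : Nat) : Prop :=
  ∀ fA d b y x, 5 * fA + (4 - d) ≤ n → pvInG map (y, x) → pvP map b →
    pvP map (pvAFrom map fA d b y x) ∧ ∃ t, pvAFrom map fA d b y x = b ++ t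

lemma post_sub (map : List (List Int)) (n : Nat)
    (ih : ∀ m, m < n → pvPostStmt map m) (fA : Nat) (hfa : 5 * fA < n)
    (b : List (Int × Int)) (nb : Int × Int) (hnb : pvInG map nb) (hb : pvP map b) (hf : nb ∉ b) :
    pvP map (pvExplore map fA (b ++ [nb]) nb.1 nb.2) ∧
      ∃ t, pvExplore map fA (b ++ [nb]) nb.1 nb.2 = b ++ t := by
  have hb' : pvP map (b ++ [nb]) := pvP_append_fresh map hb hnb hf
  cases fA with
  | zero => exact ⟨hb', [nb], by simp [pvExplore]⟩
  | succ g =>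
    rw [explore_eq_aFrom]
    have h := ih (5 * g + 4) (by omega) g 0 (b ++ [nb]) nb.1 nb.2 (by omega) hnb hb'
    obtain ⟨hP, t, ht⟩ := h
    exact ⟨hP, [nb] ++ t, by rw [ht, List.append_assoc]⟩

lemma aFrom_post_main (map : List (List Int)) (hpre : Pre_Basins map) :
    ∀ n, pvPostStmt map n := by
  intro n
  induction n using Nat.strong_induction_on with
  | _ n ih =>
    intro fA d b y x hn hin hb
    by_cases hd : 4 ≤ d
    · obtain ⟨e, rfl⟩ : ∃ e, d = e + 4 := ⟨d - 4, by omega⟩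
      exact ⟨by simpa [pvAFrom] using hb, [], by simp [pvAFrom]⟩
    · have hn1 : 1 ≤ n := by omega
      interval_cases d
      · rw [pvAFrom]
        split_ifs with hc
        · obtain ⟨hP', t', ht'⟩ := post_sub map n ih fA (by omega) b (y - 1, x)
            (pvInG_up map hpre hin (by omega)) hb hc.2.1
          obtain ⟨hP, t, ht⟩ := ih (n - 1) (by omega) fA 1 _ y x (by omega) hin hP'
          exact ⟨hP, t' ++ t, by rw [ht, ht', List.append_assoc]⟩
        · exact ih (n - 1) (by omega) fA 1 b y x (by omega) hin hb
      · rw [pvAFrom]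
        split_ifs with hc
        · obtain ⟨hP', t', ht'⟩ := post_sub map n ih fA (by omega) b (y, x - 1)
            (pvInG_left map hin (by omega)) hb hc.2.1
          obtain ⟨hP, t, ht⟩ := ih (n - 1) (by omega) fA 2 _ y x (by omega) hin hP'
          exact ⟨hP, t' ++ t, by rw [ht, ht', List.append_assoc]⟩
        · exact ih (n - 1) (by omega) fA 2 b y x (by omega) hin hb
      · rw [pvAFrom]
        split_ifs with hc
        · obtain ⟨hP', t', ht'⟩ := post_sub map n ih fA (by omega) b (y + 1, x)
            (pvInG_down map hpre hin (by omega)) hb hc.2.1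
          obtain ⟨hP, t, ht⟩ := ih (n - 1) (by omega) fA 3 _ y x (by omega) hin hP'
          exact ⟨hP, t' ++ t, by rw [ht, ht', List.append_assoc]⟩
        · exact ih (n - 1) (by omega) fA 3 b y x (by omega) hin hb
      · rw [pvAFrom]
        split_ifs with hc
        · obtain ⟨hP', t', ht'⟩ := post_sub map n ih fA (by omega) b (y, x + 1)
            (pvInG_right map hin (by omega)) hb hc.2.1
          obtain ⟨hP, t, ht⟩ := ih (n - 1) (by omega) fA 4 _ y x (by omega) hin hP'
          exact ⟨hP, t' ++ t, by rw [ht, ht', List.append_assoc]⟩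
        · exact ih (n - 1) (by omega) fA 4 b y x (by omega) hin hb

lemma aFrom_post (map : List (List Int)) (hpre : Pre_Basins map)
    (fA d : Nat) (b : List (Int × Int)) (y x : Int)
    (hin : pvInG map (y, x)) (hb : pvP map b) :
    pvP map (pvAFrom map fA d b y x) ∧ ∃ t, pvAFrom map fA d b y x = b ++ t :=
  aFrom_post_main map hpre (5 * fA + (4 - d)) fA d b y x (le_refl _) hin hb

def pvSimStmt (map : List (List Int)) (n : Nat) : Prop :=
  ∀ (fA d : Nat) (b : List (Int × Int)) (y x : Int) rest (fB : Nat), 5 * fA + (4 - d) ≤ n →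
    pvInG map (y, x) → pvP map b →
    (map.map List.length).sum ≤ fA + b.length → (map.map List.length).sum ≤ fB + b.length →
    pvFlood map fB b (((y, x), d) :: rest) =
      pvFlood map (fB - ((pvAFrom map fA d b y x).length - b.length)) (pvAFrom map fA d b y x) rest

lemma sim_step (map : List (List Int)) (hpre : Pre_Basins map) (n : Nat)
    (ih : ∀ m, m < n → pvSimStmt map m)
    (fA d : Nat) (hd : d < 4) (b : List (Int × Int)) (y x : Int) (rest : List ((Int × Int) × Nat))
    (fB : Nat) (hn : 5 * fA + (4 - d) ≤ n)
    (hin : pvInG map (y, x)) (hb : pvP map b)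
    (hNA : (map.map List.length).sum ≤ fA + b.length)
    (hNB : (map.map List.length).sum ≤ fB + b.length)
    (g : Prop) [Decidable g]
    (hgeo : pvInG map (pvNbr y x d) ↔ g)
    (hAeq : ∀ b' : List (Int × Int), pvAFrom map fA d b' y x = pvAFrom map fA (d + 1)
      (if g ∧ pvNbr y x d ∉ b' ∧ pvCell map (pvNbr y x d).1 (pvNbr y x d).2 ≠ 9 then
        pvExplore map fA (b' ++ [pvNbr y x d]) (pvNbr y x d).1 (pvNbr y x d).2 else b') y x) :
    pvFlood map fB b (((y, x), d) :: rest) =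
      pvFlood map (fB - ((pvAFrom map fA d b y x).length - b.length)) (pvAFrom map fA d b y x) rest := by
  conv_lhs => rw [pvFlood.eq_def]
  dsimp only
  rw [if_neg (by omega : ¬ 4 ≤ d)]
  by_cases hc : g ∧ pvNbr y x d ∉ b ∧ pvCell map (pvNbr y x d).1 (pvNbr y x d).2 ≠ 9
  · -- the neighbour is discovered: push a frame and explore it first
    have hnb : pvInG map (pvNbr y x d) := hgeo.mpr hc.1
    have hb' : pvP map (b ++ [pvNbr y x d]) := pvP_append_fresh map hb hnb hc.2.1
    have hlapp : (b ++ [pvNbr y x d]).length = b.length + 1 := by simp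
    have hlen1 : b.length + 1 ≤ (map.map List.length).sum := by
      have := basin_len_le map _ hb'
      simpa using this
    obtain ⟨g', rfl⟩ : ∃ g', fA = g' + 1 := ⟨fA - 1, by omega⟩
    obtain ⟨fB', rfl⟩ : ∃ f', fB = f' + 1 := ⟨fB - 1, by omega⟩
    rw [if_pos ⟨hnb.1, hnb.2.1, hnb.2.2.1, hnb.2.2.2, hc.2.1, hc.2.2⟩]
    show pvFlood map fB' (b ++ [pvNbr y x d])
        ((pvNbr y x d, 0) :: ((y, x), d + 1) :: rest) = _
    have h1 := ih (n - 1) (by omega) g' 0 (b ++ [pvNbr y x d]) (pvNbr y x d).1 (pvNbr y x d).2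
      (((y, x), d + 1) :: rest) fB' (by omega) hnb hb' (by omega) (by omega)
    rw [Prod.mk.eta] at h1
    rw [h1]
    have hpost1 := aFrom_post map hpre g' 0 (b ++ [pvNbr y x d]) (pvNbr y x d).1 (pvNbr y x d).2 hnb hb'
    obtain ⟨hP1, t1, ht1⟩ := hpost1
    have hb1len : b.length + 1 ≤ (pvAFrom map g' 0 (b ++ [pvNbr y x d]) (pvNbr y x d).1 (pvNbr y x d).2).length := by
      rw [ht1]; simp
    have hb1N : (pvAFrom map g' 0 (b ++ [pvNbr y x d]) (pvNbr y x d).1 (pvNbr y x d).2).length ≤ (map.map List.length).sum :=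
      basin_len_le map _ hP1
    have h2 := ih (n - 1) (by omega) (g' + 1) (d + 1)
      (pvAFrom map g' 0 (b ++ [pvNbr y x d]) (pvNbr y x d).1 (pvNbr y x d).2) y x rest
      (fB' - ((pvAFrom map g' 0 (b ++ [pvNbr y x d]) (pvNbr y x d).1 (pvNbr y x d).2).length - (b.length + 1)))
      (by omega) hin hP1 (by omega) (by omega)
    have harg : fB' - ((pvAFrom map g' 0 (b ++ [pvNbr y x d]) (pvNbr y x d).1 (pvNbr y x d).2).length - (b ++ [pvNbr y x d]).length)
        = fB' - ((pvAFrom map g' 0 (b ++ [pvNbr y x d]) (pvNbr y x d).1 (pvNbr y x d).2).length - (b.length + 1)) := by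
      simp
    rw [harg, h2]
    have hAv : pvAFrom map (g' + 1) d b y x = pvAFrom map (g' + 1) (d + 1)
        (pvAFrom map g' 0 (b ++ [pvNbr y x d]) (pvNbr y x d).1 (pvNbr y x d).2) y x := by
      rw [hAeq b, if_pos hc, explore_eq_aFrom]
    rw [hAv]
    have hpost2 := aFrom_post map hpre (g' + 1) (d + 1)
      (pvAFrom map g' 0 (b ++ [pvNbr y x d]) (pvNbr y x d).1 (pvNbr y x d).2) y x hin hP1
    obtain ⟨hP2, t2, ht2⟩ := hpost2
    have hbFlen : (pvAFrom map g' 0 (b ++ [pvNbr y x d]) (pvNbr y x d).1 (pvNbr y x d).2).length ≤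
        (pvAFrom map (g' + 1) (d + 1) (pvAFrom map g' 0 (b ++ [pvNbr y x d]) (pvNbr y x d).1 (pvNbr y x d).2) y x).length := by
      rw [ht2]; simp
    have hbFN : (pvAFrom map (g' + 1) (d + 1) (pvAFrom map g' 0 (b ++ [pvNbr y x d]) (pvNbr y x d).1 (pvNbr y x d).2) y x).length ≤
        (map.map List.length).sum := basin_len_le map _ hP2
    congr 1
    omega
  · -- the neighbour is rejected: advance this frame's direction
    rw [if_neg (fun h6 => hc ⟨hgeo.mp ⟨h6.1, h6.2.1, h6.2.2.1, h6.2.2.2.1⟩, h6.2.2.2.2.1, h6.2.2.2.2.2⟩)]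
    rw [hAeq b, if_neg hc]
    exact ih (n - 1) (by omega) fA (d + 1) b y x rest fB (by omega) hin hb hNA hNB

lemma sim (map : List (List Int)) (hpre : Pre_Basins map) : ∀ n, pvSimStmt map n := by
  intro n
  induction n using Nat.strong_induction_on with
  | _ n ih =>
    intro fA d b y x rest fB hn hin hb hNA hNB
    by_cases hd : 4 ≤ d
    · obtain ⟨e, rfl⟩ : ∃ e, d = e + 4 := ⟨d - 4, by omega⟩
      conv_lhs => rw [pvFlood.eq_def]
      dsimp only
      rw [if_pos (by omega : 4 ≤ e + 4)]
      simp [pvAFrom]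
    · obtain ⟨h1, h2, h3, h4⟩ := hin
      dsimp only at h1 h2 h3 h4
      interval_cases d
      · refine sim_step map hpre n ih fA 0 (by omega) b y x rest fB hn ⟨h1, h2, h3, h4⟩ hb hNA hNB
          (0 < y) ?_ ?_
        · dsimp only [pvNbr]
          exact ⟨fun hg => by have := hg.1; dsimp only at this; omega,
                 fun hy => pvInG_up map hpre ⟨h1, h2, h3, h4⟩ hy⟩
        · intro b'; rw [pvAFrom]; rfl
      · refine sim_step map hpre n ih fA 1 (by omega) b y x rest fB hn ⟨h1, h2, h3, h4⟩ hb hNA hNB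
          (0 < x) ?_ ?_
        · dsimp only [pvNbr]
          exact ⟨fun hg => by have := hg.2.2.1; dsimp only at this; omega,
                 fun hx => pvInG_left map ⟨h1, h2, h3, h4⟩ hx⟩
        · intro b'; rw [pvAFrom]; rfl
      · refine sim_step map hpre n ih fA 2 (by omega) b y x rest fB hn ⟨h1, h2, h3, h4⟩ hb hNA hNB
          (y < (map.length : Int) - 1) ?_ ?_
        · dsimp only [pvNbr]
          exact ⟨fun hg => by have := hg.2.1; dsimp only at this; omega,
                 fun hy => pvInG_down map hpre ⟨h1, h2, h3, h4⟩ hy⟩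
        · intro b'; rw [pvAFrom]; rfl
      · refine sim_step map hpre n ih fA 3 (by omega) b y x rest fB hn ⟨h1, h2, h3, h4⟩ hb hNA hNB
          (x < pvRowLen map y - 1) ?_ ?_
        · dsimp only [pvNbr]
          exact ⟨fun hg => by have := hg.2.2.2; dsimp only at this; omega,
                 fun hx => pvInG_right map ⟨h1, h2, h3, h4⟩ hx⟩
        · intro b'; rw [pvAFrom]; rfl

lemma flood_eq_explore (map : List (List Int)) (y x : Int)
    (hpre : Pre_Basins map) (hin : pvInG map (y, x)) :
    pvFlood map (pvFuel map) [(y, x)] [((y, x), 0)] = pvExplore map (pvFuel map) [(y, x)] y x := by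
  have hb : pvP map [(y, x)] := by
    refine ⟨List.nodup_singleton _, ?_⟩
    intro c hc
    simp only [List.mem_singleton] at hc
    subst hc; exact hin
  have h := sim map hpre (5 * (map.map List.length).sum + 4) (map.map List.length).sum 0
    [(y, x)] y x [] (pvFuel map) (le_refl _) hin hb (by simp) (by unfold pvFuel; omega)
  unfold pvFuel at h ⊢
  rw [h, explore_eq_aFrom]
  conv_lhs => rw [pvFlood.eq_def]

lemma lowpoint_iff (map : List (List Int)) (y x : Int)
    (hin : pvInG map (y, x)) :
    ((y = 0 ∨ (y > 0 ∧ pvCell map y x < pvCell map (y - 1) x)) ∧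
     (y = (map.length : Int) - 1 ∨ (y < (map.length : Int) - 1 ∧ pvCell map y x < pvCell map (y + 1) x)) ∧
     (x = 0 ∨ (x > 0 ∧ pvCell map y x < pvCell map y (x - 1))) ∧
     (x = pvRowLen map y - 1 ∨ (x < pvRowLen map y - 1 ∧ pvCell map y x < pvCell map y (x + 1)))) ↔
    (((if y > 0 then [(y - 1, x)] else []) ++
      (if x > 0 then [(y, x - 1)] else []) ++
      (if y < (map.length : Int) - 1 then [(y + 1, x)] else []) ++
      (if x < pvRowLen map y - 1 then [(y, x + 1)] else [])).all
        (fun c => pvCell map c.1 c.2 > pvCell map y x)) = true := by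
  obtain ⟨h1, h2, h3, h4⟩ := hin
  dsimp only at h1 h2 h3 h4
  by_cases hy0 : 0 < y <;> by_cases hx0 : 0 < x <;>
    by_cases hyd : y < (map.length : Int) - 1 <;> by_cases hxd : x < pvRowLen map y - 1 <;>
    simp [hy0, hx0, hyd, hxd, gt_iff_lt] <;> omega

-- ===== VERDICT (by name: the statement is the Claim_ definition above) =====
theorem Basins_spec : Claim_equal_Basins := by
  intro map hdom hpre
  unfold Spec_Basins Basins Basins_alt
  apply congrArg (fun d : PySem.Dict (Int × Int) (List (Int × Int)) => d.items.map (fun p => (p.1.1, p.1.2, p.2)))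
  apply PySem.List.foldl_congr_mem
  intro acc y hy
  rw [PySem.List.mem_pyRange_one] at hy
  apply PySem.List.foldl_congr_mem
  intro acc' x hx
  rw [PySem.List.mem_pyRange_one] at hx
  have hin : pvInG map (y, x) := ⟨hy.1, hy.2, hx.1, hx.2⟩
  exact if_congr (lowpoint_iff map y x hin)
    (by rw [flood_eq_explore map y x hpre hin]) rfl
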